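-- pv_equiv track=rewrite | github.com/goracle/dirichlet-divisor-conjecture | gauss_circle_conjecture/identities_verification/identity3.py | S_sqrt
-- ===== SOURCE A (Python) =====
-- def C(x):
--     if x <= 0:
--         return 0
--     return (x + 3)//4 - (x + 1)//4
--
-- def S_sqrt(N):
--     total = 0
--     d = 1
--     while d <= N:
--         v = N // d
--         dmax = N // v
--
--         block_sum = C(dmax) - C(d-1)
--
--         total += 4 * v * v * block_sum
--
--         d = dmax + 1
--
--     return total
-- ===== SOURCE B (Python) =====
-- def C(x):
--     if x <= 0:
--         return 0
--     return (x + 3)//4 - (x + 1)//4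
--
-- def S_sqrt(N):
--     if N <= 0:
--         return 0
--     k = 0
--     while (k + 1) * (k + 1) <= N:
--         k += 1
--     total = 0
--     for d in range(1, k + 1):
--         r = d % 4
--         if r == 1:
--             q = N // d
--             total += q * q
--         elif r == 3:
--             q = N // d
--             total -= q * q
--     m = N // (k + 1)
--     for v in range(1, m + 1):
--         lo = max(k, N // (v + 1))
--         total += v * v * (C(N // v) - C(lo))
--     return 4 * total
-- ===== Notes on version B (the rewrite author's own statement) =====
-- stated objective: alternative
-- what changed: Replaces A's block-jumping while loop (d jumps to N//(N//d)+1, summing C over each block) with the classic two-regime square-root split: a hand-rolled isqrt, a direct for-loop over d <= isqrt(N) adding +/-(N//d)^2 by d mod 4, and a for-loop over the quotient values v = 1..N//(isqrt(N)+1) weighting v^2 by the character count C over the quotient interval.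
import Mathlib
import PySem

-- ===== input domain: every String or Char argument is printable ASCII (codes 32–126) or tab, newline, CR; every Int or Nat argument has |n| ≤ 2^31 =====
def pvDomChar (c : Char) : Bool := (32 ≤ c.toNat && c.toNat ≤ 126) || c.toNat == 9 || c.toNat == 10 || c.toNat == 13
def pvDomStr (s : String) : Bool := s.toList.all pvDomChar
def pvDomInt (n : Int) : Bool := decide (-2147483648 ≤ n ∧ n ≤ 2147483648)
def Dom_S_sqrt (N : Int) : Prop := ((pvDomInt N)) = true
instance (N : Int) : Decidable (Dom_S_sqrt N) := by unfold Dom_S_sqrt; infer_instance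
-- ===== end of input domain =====

-- B replaces A's block-jumping while loop with the two-regime sqrt split: a direct loop
-- over d ≤ isqrt(N) (signed by d mod 4) plus a loop over the quotient values v ≤ N//(isqrt(N)+1)
-- weighted by C over the quotient interval (objective: alternative, same asymptotic cost).

-- ===== PORT A =====
-- helper C, shared source of both Pythons
def C (x : Int) : Int :=
  if x ≤ 0 then 0
  else PySem.Int.floordiv (x + 3) 4 - PySem.Int.floordiv (x + 1) 4

-- termination facts for A's while loop (cited by the port's recursive call / decreasing_by)
theorem pv_v_pos {N d : Int} (hd : 1 ≤ d) (h : d ≤ N) : 1 ≤ PySem.Int.floordiv N d := by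
  rw [PySem.Int.le_floordiv_iff_mul_le (by omega)]; omega

theorem pv_dmax_ge {N d : Int} (hd : 1 ≤ d) (h : d ≤ N) :
    d ≤ PySem.Int.floordiv N (PySem.Int.floordiv N d) := by
  have hv := pv_v_pos hd h
  rw [PySem.Int.le_floordiv_iff_mul_le (by omega)]
  have : PySem.Int.floordiv N d * d ≤ N := by
    rw [← PySem.Int.le_floordiv_iff_mul_le (by omega)]
  nlinarith

-- A's while loop: state (total, d); the loop invariant 1 ≤ d is carried as a hypothesis
-- so that the jump d := N//(N//d) + 1 provably increases d
def S_sqrt_go (N total d : Int) (hd : 1 ≤ d) : Int :=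
  if h : d ≤ N then
    let v := PySem.Int.floordiv N d
    let dmax := PySem.Int.floordiv N v
    S_sqrt_go N (total + 4 * v * v * (C dmax - C (d - 1))) (dmax + 1)
      (by show 1 ≤ PySem.Int.floordiv N (PySem.Int.floordiv N d) + 1
          have := pv_dmax_ge hd h; omega)
  else total
termination_by (N + 1 - d).toNat
decreasing_by
  have := pv_dmax_ge hd h
  omega

def S_sqrt (N : Int) : Int := S_sqrt_go N 0 1 (le_refl 1)

-- ===== PORT B =====
-- B's hand-rolled integer square root loop: k = 0; while (k+1)*(k+1) <= N: k += 1
-- (invariant 0 ≤ k carried as a hypothesis for termination)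
def pv_isqrt_go (N k : Int) (hk : 0 ≤ k) : Int :=
  if h : (k + 1) * (k + 1) ≤ N then pv_isqrt_go N (k + 1) (by omega) else k
termination_by (N - k).toNat
decreasing_by
  have : k + 1 ≤ (k + 1) * (k + 1) := by nlinarith
  omega

def S_sqrt_alt (N : Int) : Int :=
  if N ≤ 0 then 0
  else
    let k := pv_isqrt_go N 0 (le_refl 0)
    let t1 := (PySem.List.pyRange 1 (k + 1) 1).foldl
      (fun total d =>
        let r := PySem.Int.mod d 4
        if r = 1 then
          let q := PySem.Int.floordiv N d
          total + q * q
        else if r = 3 then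
          let q := PySem.Int.floordiv N d
          total - q * q
        else total) 0
    let m := PySem.Int.floordiv N (k + 1)
    let t2 := (PySem.List.pyRange 1 (m + 1) 1).foldl
      (fun total v =>
        let lo := max k (PySem.Int.floordiv N (v + 1))
        total + v * v * (C (PySem.Int.floordiv N v) - C lo)) t1
    4 * t2

-- ===== PRECONDITION & SPEC =====
def Spec_S_sqrt (N : Int) (out : Int) : Prop := out = S_sqrt_alt N
instance (N : Int) (out : Int) : Decidable (Spec_S_sqrt N out) := by unfold Spec_S_sqrt; infer_instance

-- ===== CLAIM (what is proved, stated in full; the proofs are below) =====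
def Claim_equal_S_sqrt : Prop := ∀ (N : Int), Dom_S_sqrt N → Spec_S_sqrt N (S_sqrt N)

-- ===== LEMMAS AND PROOFS =====

-- the per-d summand of the common reference sum  Σ_{d=1}^{N} pvF N d
def pvF (N d : Int) : Int :=
  4 * PySem.Int.floordiv N d * PySem.Int.floordiv N d * (C d - C (d - 1))

-- N//e is constant on a block: d ≤ e ≤ N//(N//d) → N//e = N//d
theorem pv_block_const {N d e : Int} (hd : 1 ≤ d) (hN : d ≤ N)
    (h1 : d ≤ e) (h2 : e ≤ PySem.Int.floordiv N (PySem.Int.floordiv N d)) :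
    PySem.Int.floordiv N e = PySem.Int.floordiv N d := by
  have hv := pv_v_pos hd hN
  set v := PySem.Int.floordiv N d with hvdef
  have he : 1 ≤ e := by omega
  have hle : v ≤ PySem.Int.floordiv N e := by
    rw [PySem.Int.le_floordiv_iff_mul_le (by omega)]
    have : e * v ≤ N := by
      rw [← PySem.Int.le_floordiv_iff_mul_le (by omega)]; exact h2
    nlinarith
  have hge : PySem.Int.floordiv N e < v + 1 := by
    rw [PySem.Int.floordiv_lt_iff_lt_mul (by omega)]
    have hNd : N < (v + 1) * d := by
      rw [← PySem.Int.floordiv_lt_iff_lt_mul (by omega)]; omega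
    have : (v + 1) * d ≤ (v + 1) * e := by
      apply mul_le_mul_of_nonneg_left h1 (by omega)
    omega
  omega

-- telescoping of C over an integer range
theorem pv_tele : ∀ (k : Nat) (a : Int),
    ((PySem.List.pyRange a (a + k) 1).map (fun e => C e - C (e - 1))).sum
      = C (a + k - 1) - C (a - 1) := by
  intro k
  induction k with
  | zero => intro a; rw [PySem.List.pyRange_one_eq_nil (by omega)]; simp
  | succ k ih =>
    intro a
    rw [show (a + ((k+1:Nat) : Int)) = (a+1) + (k : Nat) by push_cast; ring]
    rw [PySem.List.pyRange_one_cons (by omega)]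
    simp only [List.map_cons, List.sum_cons]
    rw [ih (a+1)]
    rw [show (a+1:Int) - 1 = a by ring]
    rw [show ((a+1) + (k:Nat) - 1 : Int) = a + ((k+1:Nat) : Int) - 1 by push_cast; ring]
    ring

-- A side: the loop from d equals the tail [d, N] of the reference sum
theorem pv_go_eq (N total d : Int) (hd : 1 ≤ d) :
    S_sqrt_go N total d hd = total + ((PySem.List.pyRange d (N + 1) 1).map (pvF N)).sum := by
  induction total, d, hd using S_sqrt_go.induct N with
  | case2 total d hd h =>
    rw [S_sqrt_go, dif_neg h, PySem.List.pyRange_one_eq_nil (by omega)]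
    simp
  | case1 total d hd h v' dmax' ih =>
    simp only [] at ih
    rw [S_sqrt_go, dif_pos h]
    simp only at ih ⊢
    rw [ih]
    set v := PySem.Int.floordiv N d with hv
    set dmax := PySem.Int.floordiv N v with hdm
    have hv1 : 1 ≤ v := pv_v_pos hd h
    have hdge : d ≤ dmax := pv_dmax_ge hd h
    have hdmle : dmax ≤ N := by
      have : dmax < N + 1 := by
        rw [hdm, PySem.Int.floordiv_lt_iff_lt_mul (by omega)]
        nlinarith
      omega
    have hID : PySem.Int.floordiv N (PySem.Int.floordiv N d) = dmax := by rw [hdm, hv]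
    rw [PySem.List.pyRange_one_append d (dmax + 1) (N + 1) (by omega) (by omega)]
    rw [List.map_append, List.sum_append]
    have hconst : ((PySem.List.pyRange d (dmax + 1) 1).map (pvF N)).sum
        = ((PySem.List.pyRange d (dmax + 1) 1).map (fun e => 4 * v * v * (C e - C (e - 1)))).sum := by
      congr 1
      apply List.map_congr_left
      intro e he
      rw [PySem.List.mem_pyRange_one] at he
      unfold pvF
      rw [pv_block_const hd h he.1 (by rw [hID]; omega), ← hv]
    have hk : dmax + 1 = d + ((dmax + 1 - d).toNat : Int) := by omega
    have htele := pv_tele (dmax + 1 - d).toNat d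
    rw [← hk] at htele
    have hfac : ((PySem.List.pyRange d (dmax + 1) 1).map (fun e => 4 * v * v * (C e - C (e - 1)))).sum
        = 4 * v * v * ((PySem.List.pyRange d (dmax + 1) 1).map (fun e => C e - C (e - 1))).sum := by
      rw [← List.sum_map_mul_left]
    rw [hconst, hfac, htele]
    rw [show dmax + 1 - 1 = dmax by ring]
    ring

-- ========== B side ==========

-- B's first loop adds the signed square; the matching per-d value
def pvG1 (N d : Int) : Int :=
  if PySem.Int.mod d 4 = 1 then PySem.Int.floordiv N d * PySem.Int.floordiv N d
  else if PySem.Int.mod d 4 = 3 then -(PySem.Int.floordiv N d * PySem.Int.floordiv N d)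
  else 0

theorem pv_foldl1 (N : Int) : ∀ (l : List Int) (t : Int),
    l.foldl (fun total d =>
        let r := PySem.Int.mod d 4
        if r = 1 then
          let q := PySem.Int.floordiv N d
          total + q * q
        else if r = 3 then
          let q := PySem.Int.floordiv N d
          total - q * q
        else total) t = t + (l.map (pvG1 N)).sum := by
  intro l
  induction l with
  | nil => intro t; simp
  | cons x xs ih =>
    intro t
    simp only [List.foldl_cons, List.map_cons, List.sum_cons, ih, pvG1]
    split_ifs <;> ring

theorem pv_foldl2 (N k : Int) : ∀ (l : List Int) (t : Int),
    l.foldl (fun total v =>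
        let lo := max k (PySem.Int.floordiv N (v + 1))
        total + v * v * (C (PySem.Int.floordiv N v) - C lo)) t
      = t + (l.map (fun v => v * v *
          (C (PySem.Int.floordiv N v) - C (max k (PySem.Int.floordiv N (v + 1)))))).sum := by
  intro l
  induction l with
  | nil => intro t; simp
  | cons x xs ih =>
    intro t
    simp only [List.foldl_cons, List.map_cons, List.sum_cons, ih]
    ring

-- C's step is the mod-4 character: +1 at 1 mod 4, -1 at 3 mod 4, 0 otherwise
theorem pv_Cstep {x : Int} (hx : 1 ≤ x) :
    C x - C (x - 1)
      = (if PySem.Int.mod x 4 = 1 then 1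
         else if PySem.Int.mod x 4 = 3 then -1 else 0) := by
  simp only [C, PySem.Int.floordiv_eq_ediv_of_pos (by omega : (0:Int) < 4),
    PySem.Int.mod_eq_emod_of_pos (by omega : (0:Int) < 4)]
  split_ifs <;> omega

theorem pv_F_eq_G1 {N d : Int} (hd : 1 ≤ d) : pvF N d = 4 * pvG1 N d := by
  unfold pvF pvG1
  rw [pv_Cstep hd]
  split_ifs <;> ring

-- floordiv is antitone in the divisor (nonnegative dividend)
theorem pv_anti {N a b : Int} (hN : 0 ≤ N) (ha : 1 ≤ a) (hab : a ≤ b) :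
    PySem.Int.floordiv N b ≤ PySem.Int.floordiv N a := by
  rw [PySem.Int.le_floordiv_iff_mul_le (by omega)]
  have h0 : 0 ≤ PySem.Int.floordiv N b := by
    rw [PySem.Int.le_floordiv_iff_mul_le (by omega)]; omega
  have h2 : PySem.Int.floordiv N b * b ≤ N := by
    rw [← PySem.Int.le_floordiv_iff_mul_le (by omega)]
  nlinarith

-- quotient interval: N//(v+1) < e ≤ N//v → N//e = v
theorem pv_quot_eq {N v e : Int} (hv : 1 ≤ v) (he : 1 ≤ e)
    (h1 : e ≤ PySem.Int.floordiv N v) (h2 : PySem.Int.floordiv N (v + 1) < e) :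
    PySem.Int.floordiv N e = v := by
  have hle : v ≤ PySem.Int.floordiv N e := by
    rw [PySem.Int.le_floordiv_iff_mul_le (by omega)]
    have : e * v ≤ N := by
      rw [← PySem.Int.le_floordiv_iff_mul_le (by omega)]; exact h1
    nlinarith
  have hge : PySem.Int.floordiv N e < v + 1 := by
    rw [PySem.Int.floordiv_lt_iff_lt_mul (by omega)]
    have : N < e * (v + 1) := by
      rw [← PySem.Int.floordiv_lt_iff_lt_mul (by omega)]; exact h2
    nlinarith
  omega

-- the reference sum over one quotient interval (lo, hi]
theorem pv_interval {N v lo hi : Int} (hv : 1 ≤ v) (h0 : 0 ≤ lo) (hlh : lo ≤ hi)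
    (hhi : hi ≤ PySem.Int.floordiv N v) (hlo : PySem.Int.floordiv N (v + 1) ≤ lo) :
    ((PySem.List.pyRange (lo + 1) (hi + 1) 1).map (pvF N)).sum = 4 * v * v * (C hi - C lo) := by
  have hconst : ((PySem.List.pyRange (lo + 1) (hi + 1) 1).map (pvF N)).sum
      = ((PySem.List.pyRange (lo + 1) (hi + 1) 1).map (fun e => 4 * v * v * (C e - C (e - 1)))).sum := by
    congr 1
    apply List.map_congr_left
    intro e he
    rw [PySem.List.mem_pyRange_one] at he
    unfold pvF
    rw [pv_quot_eq hv (by omega) (by omega) (by omega)]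
  have hk : hi + 1 = (lo + 1) + ((hi - lo).toNat : Int) := by omega
  have htele := pv_tele (hi - lo).toNat (lo + 1)
  rw [← hk] at htele
  have hfac : ((PySem.List.pyRange (lo + 1) (hi + 1) 1).map (fun e => 4 * v * v * (C e - C (e - 1)))).sum
      = 4 * v * v * ((PySem.List.pyRange (lo + 1) (hi + 1) 1).map (fun e => C e - C (e - 1))).sum := by
    rw [← List.sum_map_mul_left]
  rw [hconst, hfac, htele]
  rw [show hi + 1 - 1 = hi by ring, show lo + 1 - 1 = lo by ring]

-- second region: the reference sum over (k, N//v] equals B's v-loop tail [v, m]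
theorem pv_region {N k m : Int} (hk : 0 ≤ k) (hkN : k + 1 ≤ N)
    (hm : m = PySem.Int.floordiv N (k + 1)) :
    ∀ (j : Nat) (v : Int), 1 ≤ v → v ≤ m → m + 1 = v + j →
    ((PySem.List.pyRange (k + 1) (PySem.Int.floordiv N v + 1) 1).map (pvF N)).sum
      = 4 * ((PySem.List.pyRange v (m + 1) 1).map (fun w => w * w *
          (C (PySem.Int.floordiv N w) - C (max k (PySem.Int.floordiv N (w + 1)))))).sum := by
  intro j
  induction j with
  | zero => intro v h1 h2 h3; omega
  | succ j ih =>
    intro v h1 h2 h3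
    have hN : 0 ≤ N := by omega
    have hm1 : 1 ≤ m := by omega
    have hNm : k + 1 ≤ PySem.Int.floordiv N m := by
      rw [hm]; exact pv_dmax_ge (by omega) (by omega)
    have hbv : k + 1 ≤ PySem.Int.floordiv N v :=
      le_trans hNm (pv_anti hN h1 h2)
    by_cases hvm : v = m
    · -- last interval (k, N//m]
      subst hvm
      have hlow : PySem.Int.floordiv N (v + 1) ≤ k := by
        have : PySem.Int.floordiv N (v + 1) < k + 1 := by
          rw [PySem.Int.floordiv_lt_iff_lt_mul (by omega)]
          have : PySem.Int.floordiv N (k + 1) < v + 1 := by omega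
          rw [PySem.Int.floordiv_lt_iff_lt_mul (by omega)] at this
          nlinarith
        omega
      rw [show PySem.List.pyRange v (v + 1) 1 = [v] from PySem.List.pyRange_one_singleton v]
      simp only [List.map_cons, List.map_nil, List.sum_cons, List.sum_nil]
      rw [pv_interval h1 hk (by omega) (le_refl _) hlow]
      rw [max_eq_left hlow]
      ring
    · -- split (k, N//v] at N//(v+1)
      have hvlt : v + 1 ≤ m := by omega
      have hb1 : k + 1 ≤ PySem.Int.floordiv N (v + 1) :=
        le_trans hNm (pv_anti hN (by omega) hvlt)
      have hanti : PySem.Int.floordiv N (v + 1) ≤ PySem.Int.floordiv N v :=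
        pv_anti hN h1 (by omega)
      rw [PySem.List.pyRange_one_append (k + 1) (PySem.Int.floordiv N (v + 1) + 1)
            (PySem.Int.floordiv N v + 1) (by omega) (by omega)]
      rw [List.map_append, List.sum_append]
      rw [ih (v + 1) (by omega) hvlt (by omega)]
      rw [pv_interval h1 (by omega) hanti (le_refl _) (le_refl _)]
      rw [PySem.List.pyRange_one_cons (by omega : v < m + 1)]
      simp only [List.map_cons, List.sum_cons]
      rw [max_eq_right (by omega : k ≤ PySem.Int.floordiv N (v + 1))]
      ring

-- isqrt loop bounds: the result stays in [start, N]
theorem pv_isqrt_ge (N : Int) : ∀ (k : Int) (hk : 0 ≤ k), k ≤ pv_isqrt_go N k hk := by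
  intro k hk
  induction k, hk using pv_isqrt_go.induct N with
  | case1 k hk h ih => rw [pv_isqrt_go, dif_pos h]; omega
  | case2 k hk h => rw [pv_isqrt_go, dif_neg h]

theorem pv_isqrt_le (N : Int) : ∀ (k : Int) (hk : 0 ≤ k), k ≤ N → pv_isqrt_go N k hk ≤ N := by
  intro k hk
  induction k, hk using pv_isqrt_go.induct N with
  | case1 k hk h ih =>
    intro _
    rw [pv_isqrt_go, dif_pos h]
    exact ih (by nlinarith)
  | case2 k hk h => intro hkN; rw [pv_isqrt_go, dif_neg h]; exact hkN

theorem pv_fdiv_one (N : Int) : PySem.Int.floordiv N 1 = N := by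
  rw [PySem.Int.floordiv_eq_ediv_of_pos (by omega)]; exact Int.ediv_one N

-- B equals the reference sum
theorem pv_alt_eq (N : Int) :
    S_sqrt_alt N = ((PySem.List.pyRange 1 (N + 1) 1).map (pvF N)).sum := by
  by_cases hN : N ≤ 0
  · rw [S_sqrt_alt, if_pos hN, PySem.List.pyRange_one_eq_nil (by omega)]
    simp
  · rw [S_sqrt_alt, if_neg hN]
    simp only []
    set k := pv_isqrt_go N 0 (le_refl 0) with hkdef
    have hk0 : 0 ≤ k := pv_isqrt_ge N 0 (le_refl 0)
    have hkN : k ≤ N := pv_isqrt_le N 0 (le_refl 0) (by omega)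
    rw [pv_foldl1, pv_foldl2]
    set m := PySem.Int.floordiv N (k + 1) with hmdef
    have hm0 : 0 ≤ m := by
      rw [hmdef, PySem.Int.le_floordiv_iff_mul_le (by omega)]; omega
    -- split the reference sum at k
    rw [PySem.List.pyRange_one_append 1 (k + 1) (N + 1) (by omega) (by omega)]
    rw [List.map_append, List.sum_append]
    -- first region: per-d signed squares
    have h1 : ((PySem.List.pyRange 1 (k + 1) 1).map (pvF N)).sum
        = 4 * ((PySem.List.pyRange 1 (k + 1) 1).map (pvG1 N)).sum := by
      have hfac : ((PySem.List.pyRange 1 (k + 1) 1).map (fun d => 4 * pvG1 N d)).sum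
          = 4 * ((PySem.List.pyRange 1 (k + 1) 1).map (pvG1 N)).sum := by
        rw [← List.sum_map_mul_left]
      rw [← hfac]
      congr 1
      apply List.map_congr_left
      intro e he
      rw [PySem.List.mem_pyRange_one] at he
      exact pv_F_eq_G1 (by omega)
    by_cases hm1 : 1 ≤ m
    · have hk1N : k + 1 ≤ N := by
        rw [hmdef, PySem.Int.le_floordiv_iff_mul_le (by omega)] at hm1; omega
      have h2 := pv_region hk0 hk1N hmdef m.toNat 1 (le_refl 1) hm1 (by omega)
      rw [pv_fdiv_one] at h2
      rw [h2, h1]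
      ring
    · -- m = 0: then N ≤ k, so k = N and both second regions are empty
      have hm00 : m = 0 := by omega
      have : N < k + 1 := by
        have : PySem.Int.floordiv N (k + 1) < 1 := by omega
        rw [PySem.Int.floordiv_lt_iff_lt_mul (by omega)] at this
        omega
      have hkeq : k = N := by omega
      rw [PySem.List.pyRange_one_eq_nil (by omega : m + 1 ≤ 1)]
      rw [PySem.List.pyRange_one_eq_nil (by omega : N + 1 ≤ k + 1)]
      simp only [List.map_nil, List.sum_nil, add_zero]
      rw [h1]
      ring

-- ===== VERDICT (by name: the statement is the Claim_ definition above) =====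
theorem S_sqrt_spec : Claim_equal_S_sqrt := by
  intro N _
  unfold Spec_S_sqrt S_sqrt
  rw [pv_go_eq, pv_alt_eq]
  simp
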